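-- pv_equiv track=rewrite | github.com/Barlua12/CodePtitPy | kiem_tra_so_dep.py | is_beautiful_number
-- ===== SOURCE A (Python) =====
-- def is_beautiful_number(n):
--     n_str=str(n);
--     if len(set(n_str))!=2:
--         return False
--     for i in range(len(n_str)-2):
--         if n_str[i]!=n_str[i+2]:
--             return False
--     return True
-- ===== SOURCE B (Python) =====
-- def is_beautiful_number(n):
--     s = str(n)
--     # whole string uses exactly two distinct digits, and each parity-class
--     # of positions is homogeneous <=> the string alternates with period 2
--     return len(set(s)) == 2 and len(set(s[0::2])) == 1 and len(set(s[1::2])) == 1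
-- ===== Notes on version B (the rewrite author's own statement) =====
-- stated objective: simpler
-- what changed: Replaced the explicit period-2 adjacent-index loop with a partition of the digit string into even-index and odd-index slices, each checked for homogeneity, under the same two-distinct-characters guard.
import Mathlib
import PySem

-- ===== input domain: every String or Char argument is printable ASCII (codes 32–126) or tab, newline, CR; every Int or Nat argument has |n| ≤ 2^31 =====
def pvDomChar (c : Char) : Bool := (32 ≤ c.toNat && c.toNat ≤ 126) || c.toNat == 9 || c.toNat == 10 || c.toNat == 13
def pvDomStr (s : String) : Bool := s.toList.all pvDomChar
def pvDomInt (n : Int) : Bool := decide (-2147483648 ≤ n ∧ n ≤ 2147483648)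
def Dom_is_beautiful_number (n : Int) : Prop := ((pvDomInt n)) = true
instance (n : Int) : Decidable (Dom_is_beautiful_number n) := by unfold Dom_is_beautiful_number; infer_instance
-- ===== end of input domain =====

-- B replaces A's explicit period-2 index loop by slicing the digit string into its
-- even-index and odd-index subsequences and checking each is homogeneous (simpler decomposition).

-- ===== PORT A =====
-- the for-loop of A with its early 'return False'; every index 0 ≤ i ≤ len-3 is in
-- range, so pyGetD with an arbitrary default is exact for Python's s[i]
def pvLoopA (s : List Char) : List Int → Bool
  | [] => true
  | i :: rest =>
      if PySem.List.pyGetD s i ' ' ≠ PySem.List.pyGetD s (i + 2) ' ' then false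
      else pvLoopA s rest

def is_beautiful_number (n : Int) : Bool :=
  let n_str := PySem.Int.toChars n
  if (PySem.Set.ofList n_str).length ≠ 2 then false
  else pvLoopA n_str (PySem.List.pyRange 0 ((n_str.length : Int) - 2) 1)

-- ===== PORT B =====
-- hand port of the step-2 slice: pvEveryOther s = s[0::2] (exact: takes indices 0,2,4,…)
def pvEveryOther : List Char → List Char
  | [] => []
  | [c] => [c]
  | c :: _ :: rest => c :: pvEveryOther rest

def is_beautiful_number_alt (n : Int) : Bool :=
  let s := PySem.Int.toChars n
  ((PySem.Set.ofList s).length == 2)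
    && ((PySem.Set.ofList (pvEveryOther s)).length == 1)          -- s[0::2]
    && ((PySem.Set.ofList (pvEveryOther s.tail)).length == 1)     -- s[1::2]

-- ===== PRECONDITION & SPEC =====
def Spec_is_beautiful_number (n : Int) (out : Bool) : Prop := out = is_beautiful_number_alt n
instance (n : Int) (out : Bool) : Decidable (Spec_is_beautiful_number n out) := by unfold Spec_is_beautiful_number; infer_instance

-- ===== CLAIM (what is proved, stated in full; the proofs are below) =====
def Claim_equal_is_beautiful_number : Prop := ∀ (n : Int), Dom_is_beautiful_number n → Spec_is_beautiful_number n (is_beautiful_number n)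

-- ===== LEMMAS AND PROOFS =====

-- structural middle form both sides are reduced to: "every character equals the one two later"
def pvAlt2 : List Char → Bool
  | a :: b :: c :: t => (a == c) && pvAlt2 (b :: c :: t)
  | _ => true

-- A's early-exit loop is an `all` over the index list
theorem pvLoopA_eq_all (s : List Char) (r : List Int) :
    pvLoopA s r = r.all (fun i => PySem.List.pyGetD s i ' ' == PySem.List.pyGetD s (i + 2) ' ') := by
  induction r with
  | nil => rfl
  | cons i rest ih =>
      by_cases h : PySem.List.pyGetD s i ' ' = PySem.List.pyGetD s (i + 2) ' ' <;>
        simp [pvLoopA, h, ih]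

-- pointwise-equal predicates give equal `all`s
theorem pvAll_congr {α : Type} (l : List α) (p q : α → Bool) (h : ∀ x ∈ l, p x = q x) :
    l.all p = l.all q := by
  induction l with
  | nil => rfl
  | cons x t ih => simp only [List.all_cons, h x (by simp), ih (fun y hy => h y (by simp [hy]))]

-- A's indexed scan over range(len-2) equals the structural scan pvAlt2
theorem pvIrange_eq_alt2 (s : List Char) :
    (List.range (s.length - 2)).all (fun k => s.getD k ' ' == s.getD (k + 2) ' ') = pvAlt2 s := by
  induction s using pvAlt2.induct with
  | case2 s h =>
      rcases s with _ | ⟨a, _ | ⟨b, _ | ⟨c, t⟩⟩⟩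
      · rfl
      · rfl
      · rfl
      · exact absurd rfl (h a b c t)
  | case1 a b c t ih =>
      have hlen : (a :: b :: c :: t).length - 2 = ((b :: c :: t).length - 2) + 1 := by
        simp
      rw [hlen, List.range_succ_eq_map, pvAlt2, ← ih]
      simp only [List.all_cons, List.all_map]
      have hhead : ((a :: b :: c :: t).getD 0 ' ' == (a :: b :: c :: t).getD (0 + 2) ' ')
          = (a == c) := rfl
      have htail : (List.range ((b :: c :: t).length - 2)).all
            ((fun k => (a :: b :: c :: t).getD k ' ' == (a :: b :: c :: t).getD (k + 2) ' ') ∘ Nat.succ)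
          = (List.range ((b :: c :: t).length - 2)).all
            (fun k => (b :: c :: t).getD k ' ' == (b :: c :: t).getD (k + 2) ' ') := by
        apply pvAll_congr
        intro k _
        rfl
      rw [hhead, htail]

-- head decomposition of the step-2 slice
theorem pvEveryOther_cons (c : Char) (t : List Char) :
    pvEveryOther (c :: t) = c :: pvEveryOther t.tail := by
  cases t <;> rfl

-- a Nodup list containing c has length 1 iff all its members are c
theorem pvNodup_len_one (S : List Char) (hn : S.Nodup) (c : Char) (hc : c ∈ S) :
    S.length = 1 ↔ ∀ a ∈ S, a = c := by
  constructor
  · intro h1 a ha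
    match S, h1 with
    | [x], _ => simp_all
  · intro hall
    match S, hn with
    | [], _ => simp at hc
    | [x], _ => rfl
    | x :: y :: t, hn =>
        exfalso
        have hx : x = c := hall x (by simp)
        have hy : y = c := hall y (by simp)
        have hnx : x ∉ y :: t := (List.nodup_cons.mp hn).1
        exact hnx (by simp [hx, hy])

-- len(set(c::l)) == 1  iff every element of l equals c
theorem pvHomog_iff (c : Char) (l : List Char) :
    (((PySem.Set.ofList (c :: l)).length == 1) = true) ↔ ∀ a ∈ l, a = c := by
  rw [beq_iff_eq]
  have hc : c ∈ PySem.Set.ofList (c :: l) := by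
    rw [PySem.Set.mem_ofList]; simp
  rw [pvNodup_len_one _ (PySem.Set.nodup_ofList _) c hc]
  constructor
  · intro h a ha
    exact h a (by rw [PySem.Set.mem_ofList]; simp [ha])
  · intro h a ha
    rw [PySem.Set.mem_ofList] at ha
    rcases List.mem_cons.mp ha with h1 | h2
    · exact h1
    · exact h a h2

-- the homogeneity recurrence on two leading characters
theorem pvHomog_cons_cons (x y : Char) (l : List Char) :
    ((PySem.Set.ofList (x :: y :: l)).length == 1)
      = ((x == y) && ((PySem.Set.ofList (y :: l)).length == 1)) := by
  rw [Bool.eq_iff_iff]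
  rw [pvHomog_iff]
  rw [Bool.and_eq_true, beq_iff_eq, pvHomog_iff]
  constructor
  · intro h
    have hy : y = x := h y (by simp)
    exact ⟨hy.symm, fun a ha => (h a (by simp [ha])).trans hy.symm⟩
  · rintro ⟨hxy, h⟩ a ha
    rcases List.mem_cons.mp ha with h1 | h2
    · rw [h1, hxy]
    · rw [h a h2, hxy]

-- B's two homogeneous-slice checks equal the structural scan, once the string has ≥ 2 chars
theorem pvGoodB_eq_alt2 (s : List Char) (h2 : 2 ≤ s.length) :
    (((PySem.Set.ofList (pvEveryOther s)).length == 1)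
      && ((PySem.Set.ofList (pvEveryOther s.tail)).length == 1)) = pvAlt2 s := by
  induction s using pvAlt2.induct with
  | case2 s h =>
      rcases s with _ | ⟨a, _ | ⟨b, _ | ⟨c, t⟩⟩⟩
      · simp at h2
      · simp at h2
      · rfl
      · exact absurd rfl (h a b c t)
  | case1 a b c t ih =>
      have ihv := ih (by simp)
      show (((PySem.Set.ofList (a :: pvEveryOther (c :: t))).length == 1)
          && ((PySem.Set.ofList (b :: pvEveryOther t)).length == 1))
        = ((a == c) && pvAlt2 (b :: c :: t))
      rw [← ihv]
      show (((PySem.Set.ofList (a :: pvEveryOther (c :: t))).length == 1)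
          && ((PySem.Set.ofList (b :: pvEveryOther t)).length == 1))
        = ((a == c) && (((PySem.Set.ofList (b :: pvEveryOther t)).length == 1)
          && ((PySem.Set.ofList (pvEveryOther (c :: t))).length == 1)))
      rw [pvEveryOther_cons c t, pvHomog_cons_cons]
      rw [Bool.and_assoc]
      rw [Bool.and_comm ((PySem.Set.ofList (c :: pvEveryOther t.tail)).length == 1)
        ((PySem.Set.ofList (b :: pvEveryOther t)).length == 1)]

-- a two-element character set needs at least two characters
theorem pvLen_ge_two (s : List Char) (h : (PySem.Set.ofList s).length = 2) : 2 ≤ s.length := by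
  match s with
  | [] => simp [PySem.Set.ofList] at h
  | [a] =>
      have h1 : PySem.Set.ofList [a] = [a] := by
        simp [PySem.Set.ofList, PySem.Set.add]
      rw [h1] at h
      simp at h
  | a :: b :: t => simp

-- ===== VERDICT (by name: the statement is the Claim_ definition above) =====
theorem is_beautiful_number_spec : Claim_equal_is_beautiful_number := by
  intro n _
  unfold Spec_is_beautiful_number is_beautiful_number is_beautiful_number_alt
  set s := PySem.Int.toChars n with hs
  by_cases hg : (PySem.Set.ofList s).length = 2
  · have h2 : 2 ≤ s.length := pvLen_ge_two s hg
    simp only [hg, ne_eq, not_true_eq_false, if_false, beq_self_eq_true, Bool.true_and]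
    rw [pvLoopA_eq_all]
    have hcast : ((s.length : Int) - 2) = (((s.length - 2 : Nat) : Nat) : Int) := by omega
    rw [hcast, PySem.List.pyRange_one]
    have htn : (((s.length - 2 : Nat) : Int) - 0).toNat = s.length - 2 := by omega
    rw [htn, List.all_map]
    have hfun : ∀ k : Nat,
        (PySem.List.pyGetD s ((0 : Int) + (k : Int)) ' ' == PySem.List.pyGetD s ((0 : Int) + (k : Int) + 2) ' ')
          = (s.getD k ' ' == s.getD (k + 2) ' ') := by
      intro k
      have e1 : (0 : Int) + (k : Int) = ((k : Nat) : Int) := by omega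
      have e2 : ((k : Nat) : Int) + 2 = (((k + 2 : Nat) : Nat) : Int) := by push_cast; ring
      rw [e1, e2, PySem.List.pyGetD_natCast, PySem.List.pyGetD_natCast]
    have hall : (List.range (s.length - 2)).all
          ((fun i => PySem.List.pyGetD s i ' ' == PySem.List.pyGetD s (i + 2) ' ') ∘ (fun k : Nat => (0 : Int) + (k : Int)))
        = (List.range (s.length - 2)).all (fun k => s.getD k ' ' == s.getD (k + 2) ' ') := by
      apply pvAll_congr
      intro k _
      exact hfun k
    rw [hall, pvIrange_eq_alt2, ← pvGoodB_eq_alt2 s h2]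
  · simp [hg]
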